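-- pv_equiv track=rewrite | github.com/luca-pellegrini/python-lab | E9-14.12.2022/mysubstring.py | get_all_substrings
-- ===== SOURCE A (Python) =====
-- def get_all_substrings(s):
--     if not isinstance(s, str):
--         raise TypeError("argument must be a string")
--     substrings = list()
--     substrings.append("")
--     # per ogni possibile lunghezza n di sottostringa
--     for n in range(1, len(s)+1):
--         # per ogni possibile posizione iniziale i
--         i = 0
--         while (i+n) <= len(s):
--             substrings.append(s[i:i+n])
--             i += 1
--     return substrings
-- ===== SOURCE B (Python) =====
-- def get_all_substrings(s):
--     if not isinstance(s, str):
--         raise TypeError("argument must be a string")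
--     # collect substrings in start-index order, then stable-sort by length:
--     # equal-length substrings keep their start-index order, giving
--     # length-major, position-minor order
--     gen = [s[i:j] for i in range(len(s)) for j in range(i + 1, len(s) + 1)]
--     return [""] + sorted(gen, key=len)
-- ===== Notes on version B (the rewrite author's own statement) =====
-- stated objective: alternative
-- what changed: A emits substrings directly in length-major order with a hand-written while loop per length; B generates all substrings in start-index order with one comprehension and relies on Python's stable sort with key=len to produce the length-then-position order.
import Mathlib
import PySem

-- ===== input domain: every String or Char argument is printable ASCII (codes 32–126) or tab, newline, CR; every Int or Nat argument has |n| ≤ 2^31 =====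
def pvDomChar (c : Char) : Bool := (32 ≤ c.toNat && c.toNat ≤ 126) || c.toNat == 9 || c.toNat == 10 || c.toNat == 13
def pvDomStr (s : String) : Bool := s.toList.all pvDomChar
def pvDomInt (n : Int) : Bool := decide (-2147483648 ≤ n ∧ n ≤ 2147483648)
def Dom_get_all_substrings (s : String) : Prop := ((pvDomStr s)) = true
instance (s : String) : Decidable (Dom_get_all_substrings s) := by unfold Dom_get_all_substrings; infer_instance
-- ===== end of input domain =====

-- B replaces A's length-major generation loops by start-index generation plus a stable sort on length (alternative algorithm, same results).


-- ===== PORT A =====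
-- the 'while (i+n) <= len(s)' loop of A, appending s[i:i+n] and stepping i
def pvWhileA (cs : List Char) (n : Int) (i : Int) (acc : List String) : List String :=
  if _h : i + n ≤ (cs.length : Int) then
    pvWhileA cs n (i + 1) (acc ++ [String.ofList (PySem.List.slice cs (some i) (some (i + n)))])
  else acc
termination_by ((cs.length : Int) + 1 - (i + n)).toNat
decreasing_by omega

def get_all_substrings (s : String) : List String :=
  (PySem.List.pyRange 1 ((s.toList.length : Int) + 1)).foldl
    (fun acc n => pvWhileA s.toList n 0 acc) [""]

-- ===== PORT B =====
def get_all_substrings_alt (s : String) : List String :=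
  "" :: PySem.List.sorted
    ((PySem.List.pyRange 0 (s.toList.length : Int)).flatMap (fun i =>
      (PySem.List.pyRange (i + 1) ((s.toList.length : Int) + 1)).map (fun j =>
        String.ofList (PySem.List.slice s.toList (some i) (some j)))))
    PySem.Str.len

-- ===== PRECONDITION & SPEC =====
def Spec_get_all_substrings (s : String) (out : List String) : Prop := out = get_all_substrings_alt s
instance (s : String) (out : List String) : Decidable (Spec_get_all_substrings s out) := by unfold Spec_get_all_substrings; infer_instance

-- ===== CLAIM (what is proved, stated in full; the proofs are below) =====
def Claim_equal_get_all_substrings : Prop := ∀ (s : String), Dom_get_all_substrings s → Spec_get_all_substrings s (get_all_substrings s)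

-- ===== LEMMAS AND PROOFS =====

-- the window list of A: all slices of one fixed length, in start order
def pvWin (cs : List Char) (n : Nat) : List String :=
  (List.range (cs.length + 1 - n)).map (fun i => String.ofList ((cs.drop i).take n))

-- B's generated list, in Nat-indexed normal form (start-index major)
def pvGen (cs : List Char) : List String :=
  (List.range cs.length).flatMap (fun i =>
    (List.range (cs.length - i)).map (fun d => String.ofList ((cs.drop i).take (d + 1))))

lemma pyRange_addNat (a : Int) (n : Nat) :
    PySem.List.pyRange a (a + (n : Int)) = (List.range n).map (fun (k : Nat) => a + (k : Int)) := by
  rcases Nat.eq_zero_or_pos n with h0 | hpos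
  · subst h0; simp [PySem.List.pyRange]
  · have hlt : a < a + (n : Int) := by omega
    simp [PySem.List.pyRange, hlt]

lemma pvWhileA_eq (cs : List Char) (n : Nat) (hn : 1 ≤ n) :
    ∀ (d i : Nat), cs.length + 1 - n - i ≤ d → ∀ acc,
      pvWhileA cs (n : Int) (i : Int) acc =
        acc ++ (List.range (cs.length + 1 - n - i)).map
          (fun t => String.ofList ((cs.drop (i + t)).take n)) := by
  intro d
  induction d with
  | zero =>
    intro i hle acc
    have hstop : ¬ ((i : Int) + (n : Int) ≤ (cs.length : Int)) := by omega
    rw [pvWhileA, dif_neg hstop]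
    have h0 : cs.length + 1 - n - i = 0 := by omega
    rw [h0]; simp
  | succ d ih =>
    intro i hle acc
    by_cases h : i + n ≤ cs.length
    · have hg : ((i : Int) + (n : Int) ≤ (cs.length : Int)) := by omega
      have hslice : PySem.List.slice cs (some (i : Int)) (some ((i : Int) + (n : Int)))
          = (cs.drop i).take n := by
        have h3 : (i : Int) + (n : Int) = ((i + n : Nat) : Int) := by push_cast; ring
        rw [h3, PySem.List.slice_natCast]
        congr 1
        omega
      have hcast : (i : Int) + 1 = ((i + 1 : Nat) : Int) := by push_cast; ring
      rw [pvWhileA, dif_pos hg, hslice, hcast, ih (i + 1) (by omega)]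
      have hsplit : cs.length + 1 - n - i = 1 + (cs.length + 1 - n - (i + 1)) := by omega
      rw [hsplit, List.range_add, List.map_append, List.map_map]
      simp only [List.range_one, List.map_cons, List.map_nil, Function.comp_def, Nat.add_zero,
        ← Nat.add_assoc, List.append_assoc, List.singleton_append]
    · have hstop : ¬ ((i : Int) + (n : Int) ≤ (cs.length : Int)) := by omega
      rw [pvWhileA, dif_neg hstop]
      have h0 : cs.length + 1 - n - i = 0 := by omega
      rw [h0]; simp

-- A's value, in Nat-indexed normal form (length major)
lemma portA_eq (s : String) :
    get_all_substrings s =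
      "" :: (List.range s.toList.length).flatMap (fun k => pvWin s.toList (k + 1)) := by
  unfold get_all_substrings
  have h1 : ((s.toList.length : Int) + 1) = 1 + (s.toList.length : Int) := by ring
  rw [h1, pyRange_addNat 1 s.toList.length, List.foldl_map]
  rw [PySem.List.foldl_congr_mem _ _ (fun acc k => acc ++ pvWin s.toList (k + 1)) _ ?hc]
  case hc =>
    intro acc k _
    have h2 : (1 : Int) + (k : Int) = ((k + 1 : Nat) : Int) := by push_cast; ring
    have h0 : (0 : Int) = ((0 : Nat) : Int) := rfl
    rw [h2, h0, pvWhileA_eq s.toList (k + 1) (by omega) (s.toList.length + 1) 0 (by omega)]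
    unfold pvWin
    simp
  rw [PySem.List.foldl_append_eq_flatMap]
  rfl

lemma genB_eq (s : String) :
    ((PySem.List.pyRange 0 (s.toList.length : Int)).flatMap (fun i =>
      (PySem.List.pyRange (i + 1) ((s.toList.length : Int) + 1)).map (fun j =>
        String.ofList (PySem.List.slice s.toList (some i) (some j))))) = pvGen s.toList := by
  unfold pvGen
  rw [PySem.List.pyRange_zero_natCast, List.flatMap_map]
  refine List.flatMap_congr ?_
  intro i hi
  have him : i < s.toList.length := List.mem_range.mp hi
  have h1 : ((s.toList.length : Int) + 1) = ((i : Int) + 1) + ((s.toList.length - i : Nat) : Int) := by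
    push_cast [him.le]; omega
  rw [h1, pyRange_addNat, List.map_map]
  refine List.map_congr_left ?_
  intro d _
  have h2 : (i : Int) + 1 + (d : Int) = ((i + 1 + d : Nat) : Int) := by push_cast; ring
  simp only [Function.comp_def]
  rw [h2, PySem.List.slice_natCast]
  congr 2
  omega

-- every element of B's generated list has length k+1 for some k < len
lemma pvGen_keys (cs : List Char) :
    ∀ x ∈ pvGen cs, ∃ k, k < cs.length ∧ PySem.Str.len x = (k : Int) + 1 := by
  intro x hx
  unfold pvGen at hx
  simp only [List.mem_flatMap, List.mem_map, List.mem_range] at hx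
  obtain ⟨i, hi, d, hd, rfl⟩ := hx
  refine ⟨d, by omega, ?_⟩
  rw [PySem.Str.len_eq, String.toList_ofList, List.length_take, List.length_drop]
  push_cast
  omega

-- stability workhorse: insertBy places x after every non-`before` element
lemma insertBy_append {α : Type} (before : α → α → Bool) (x : α) (P Q : List α)
    (hP : ∀ p ∈ P, before x p = false) (hQ : ∀ q ∈ Q, before x q = true) :
    PySem.List.insertBy before x (P ++ Q) = P ++ x :: Q := by
  induction P with
  | nil =>
    cases Q with
    | nil => simp [PySem.List.insertBy]
    | cons q qs => simp [PySem.List.insertBy, hQ q (by simp)]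
  | cons p ps ih =>
    have hp := hP p (by simp)
    have step : PySem.List.insertBy before x ((p :: ps) ++ Q)
        = p :: PySem.List.insertBy before x (ps ++ Q) := by
      simp [PySem.List.insertBy, hp]
    rw [step, ih (fun p' hp' => hP p' (by simp [hp']))]
    rfl

-- a stable sort whose keys lie in 1..m is the concatenation of its key buckets
lemma sorted_eq_buckets {α : Type} (key : α → Int) (m : Nat) (ys : List α)
    (hy : ∀ x ∈ ys, ∃ k, k < m ∧ key x = (k : Int) + 1) :
    PySem.List.sorted ys key =
      (List.range m).flatMap (fun (k : Nat) => ys.filter (fun x => decide (key x = (k : Int) + 1))) := by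
  revert hy
  induction ys using List.reverseRecOn with
  | nil => intro _; simp [PySem.List.sorted]
  | append_singleton t x ih =>
    intro hy
    obtain ⟨kx, hkx, hkey⟩ := hy x (by simp)
    have ht : ∀ y ∈ t, ∃ k, k < m ∧ key y = (k : Int) + 1 := fun y hyt => hy y (by simp [hyt])
    rw [PySem.List.sorted_eq_foldl_insertBy, List.foldl_append, List.foldl_cons, List.foldl_nil,
      ← PySem.List.sorted_eq_foldl_insertBy, ih ht]
    have hG : ∀ k : Nat, (t ++ [x]).filter (fun y => decide (key y = (k : Int) + 1))
        = t.filter (fun y => decide (key y = (k : Int) + 1)) ++ (if k = kx then [x] else []) := by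
      intro k
      rw [List.filter_append]
      congr 1
      by_cases hk : k = kx
      · subst hk; simp [hkey]
      · have hne : ¬ (key x = (k : Int) + 1) := by rw [hkey]; intro hcon; exact hk (by omega)
        simp [hne, hk]
    rw [List.flatMap_congr (fun k _ => hG k)]
    have hsplit : List.range m = List.range (kx + 1) ++ (List.range (m - (kx + 1))).map (fun j => (kx + 1) + j) := by
      rw [← List.range_add]; congr 1; omega
    rw [hsplit, List.flatMap_append, List.flatMap_append]
    rw [insertBy_append _ x _ _ ?hP ?hQ]
    case hP =>
      intro p hp
      simp only [List.mem_flatMap, List.mem_range] at hp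
      obtain ⟨k, hk, hpF⟩ := hp
      have hkp : key p = (k : Int) + 1 := of_decide_eq_true (List.mem_filter.mp hpF).2
      simp only [decide_eq_false_iff_not]
      rw [hkey, hkp]
      omega
    case hQ =>
      intro q hq
      simp only [List.mem_flatMap, List.mem_map, List.mem_range] at hq
      obtain ⟨k, ⟨j, hj, rfl⟩, hqF⟩ := hq
      have hkq : key q = ((kx + 1 + j : Nat) : Int) + 1 := of_decide_eq_true (List.mem_filter.mp hqF).2
      simp only [decide_eq_true_eq]
      rw [hkey, hkq]
      push_cast
      omega
    -- now massage the bucket lists on the right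
    have hfirst : (List.range (kx + 1)).flatMap
        (fun (k : Nat) => t.filter (fun y => decide (key y = (k : Int) + 1)) ++ (if k = kx then [x] else []))
        = (List.range (kx + 1)).flatMap (fun (k : Nat) => t.filter (fun y => decide (key y = (k : Int) + 1))) ++ [x] := by
      rw [List.range_succ, List.flatMap_append, List.flatMap_append]
      simp only [List.flatMap_cons, List.flatMap_nil]
      rw [List.flatMap_congr (l := List.range kx)
        (f := fun (k : Nat) => t.filter (fun y => decide (key y = (k : Int) + 1)) ++ (if k = kx then [x] else []))
        (g := fun (k : Nat) => t.filter (fun y => decide (key y = (k : Int) + 1))) ?hsm]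
      case hsm =>
        intro k hk
        have : k ≠ kx := by have := List.mem_range.mp hk; omega
        simp [this]
      simp
    have hsecond : ((List.range (m - (kx + 1))).map (fun j => (kx + 1) + j)).flatMap
        (fun (k : Nat) => t.filter (fun y => decide (key y = (k : Int) + 1)) ++ (if k = kx then [x] else []))
        = ((List.range (m - (kx + 1))).map (fun j => (kx + 1) + j)).flatMap
            (fun (k : Nat) => t.filter (fun y => decide (key y = (k : Int) + 1))) := by
      refine List.flatMap_congr ?_
      intro k hk
      obtain ⟨j, hj, rfl⟩ := List.mem_map.mp hk
      have : (kx + 1) + j ≠ kx := by omega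
      simp [this]
    rw [hfirst, hsecond, List.append_assoc]
    rfl
lemma flatMap_if_range {α : Type} (f : Nat → List α) (m r : Nat) (h : r ≤ m) :
    (List.range m).flatMap (fun i => if i < r then f i else []) = (List.range r).flatMap f := by
  induction m with
  | zero =>
    have : r = 0 := by omega
    subst this; simp
  | succ m ih =>
    rcases Nat.lt_or_ge r (m + 1) with h1 | h2
    · have hrm : r ≤ m := by omega
      rw [List.range_succ, List.flatMap_append, ih hrm]
      have : ¬ (m < r) := by omega
      simp [this]
    · have hr : r = m + 1 := by omega
      subst hr
      rw [List.range_succ, List.flatMap_append, List.flatMap_append]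
      congr 1
      · refine List.flatMap_congr ?_
        intro i hi
        have : i < m + 1 := by have := List.mem_range.mp hi; omega
        simp [this]
      · simp

lemma range_filter_eq (r k : Nat) :
    (List.range r).filter (fun d => decide (d = k)) = if k < r then [k] else [] := by
  induction r with
  | zero => simp
  | succ r ih =>
    rw [List.range_succ, List.filter_append, ih]
    by_cases h : r = k
    · subst h
      simp
    · have h1 : (k < r + 1) ↔ (k < r) := by omega
      simp [h, h1]

-- bucket k of B's generated list is exactly A's window list of length k+1
lemma filter_gen (cs : List Char) (k : Nat) (hk : k < cs.length) :
    (pvGen cs).filter (fun x => decide (PySem.Str.len x = (k : Int) + 1)) = pvWin cs (k + 1) := by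
  unfold pvGen pvWin
  rw [List.filter_flatMap]
  have hinner : ∀ i ∈ List.range cs.length,
      List.filter (fun x => decide (PySem.Str.len x = (k : Int) + 1))
        ((List.range (cs.length - i)).map (fun d => String.ofList ((cs.drop i).take (d + 1))))
      = if i < cs.length - k then [String.ofList ((cs.drop i).take (k + 1))] else [] := by
    intro i hi
    have him : i < cs.length := List.mem_range.mp hi
    rw [List.filter_map]
    have hpred : ∀ d ∈ List.range (cs.length - i),
        ((fun x => decide (PySem.Str.len x = (k : Int) + 1)) ∘
          (fun d => String.ofList ((cs.drop i).take (d + 1)))) d = decide (d = k) := by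
      intro d hd
      have hdlt : d < cs.length - i := List.mem_range.mp hd
      simp only [Function.comp, PySem.Str.len_eq, String.toList_ofList, List.length_take,
        List.length_drop]
      rw [decide_eq_decide]
      omega
    rw [List.filter_congr hpred, range_filter_eq]
    by_cases hc : k < cs.length - i
    · have hc' : i < cs.length - k := by omega
      simp [hc, hc']
    · have hc' : ¬ (i < cs.length - k) := by omega
      simp [hc, hc']
  rw [List.flatMap_congr hinner,
    flatMap_if_range (fun i => [String.ofList ((cs.drop i).take (k + 1))]) cs.length
      (cs.length - k) (by omega)]
  have hw : cs.length + 1 - (k + 1) = cs.length - k := by omega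
  rw [hw, ← List.map_eq_flatMap]

-- ===== VERDICT (by name: the statement is the Claim_ definition above) =====
theorem get_all_substrings_spec : Claim_equal_get_all_substrings := by
  intro s _
  unfold Spec_get_all_substrings get_all_substrings_alt
  rw [portA_eq s, genB_eq s]
  rw [sorted_eq_buckets PySem.Str.len s.toList.length (pvGen s.toList) (pvGen_keys s.toList)]
  congr 1
  refine List.flatMap_congr ?_
  intro k hk
  exact (filter_gen s.toList k (List.mem_range.mp hk)).symm
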